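-- pv_equiv track=rewrite | github.com/BallMJ92/Coursework-3 | Term2cw1.py | IgnoreCommentsAndStrings
-- ===== SOURCE A (Python) =====
-- def IgnoreCommentsAndStrings(s):
--     lineList, chars  = [], ["\"", "#"]
--     string1, string2, string3, splitString = str(), str(), str(), str()
--     flag, flag1 = 0, 0
--
--     # For loop to complete string3
--     for i in range(len(s)):
--         # Checking each individual char in string s against chars list
--         if s[i] == chars[0]:
--             # Flagging each time value in s matches chars[0] - backslash
--             flag += 1
--         # Checking s value if it matches chars[1] - # and checking if flag value is even
--         if s[i] == chars[1] and flag % 2 == 0: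
--             # Assign 1 to flag1 so string is ot split here
--             flag1 = 1
--         # assign values to splitString if flag1 is zero
--         if flag1 == 0:
--             splitString += s[i]
--         else:
--             string3 += s[i]
--     # Reinitializing flag variable to zero
--     flag = 0
--
--     # Iterating over splitString variable to divide into either string1 or string2
--     for i in splitString:
--         if i != chars[0]:
--             if flag % 2 == 0:
--                 string1 += i
--             string2 += i
--         else:
--             flag += 1
--             string2 += i
--
--     # Adding string1 to string3 to lineList
--     lineList.extend([string1, string2, string3])
--
--     return(lineList)
-- ===== SOURCE B (Python) =====
-- def IgnoreCommentsAndStrings(s):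
--     string1, string2, string3 = "", "", ""
--     quotes = 0
--     in_comment = False
--     for c in s:
--         if in_comment:
--             string3 += c
--         elif c == '#' and quotes % 2 == 0:
--             in_comment = True
--             string3 += c
--         elif c == '"':
--             quotes += 1
--             string2 += c
--         else:
--             if quotes % 2 == 0:
--                 string1 += c
--             string2 += c
--     return [string1, string2, string3]
-- ===== Notes on version B (the rewrite author's own statement) =====
-- stated objective: simpler
-- what changed: Replaced A's two passes (first splitting the line into a code/string buffer plus the comment, then re-scanning that buffer with a second quote counter to separate code from strings) by a single scan that maintains one quote counter and an in-comment flag and builds all three output strings directly, with no intermediate buffer.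
import Mathlib
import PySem

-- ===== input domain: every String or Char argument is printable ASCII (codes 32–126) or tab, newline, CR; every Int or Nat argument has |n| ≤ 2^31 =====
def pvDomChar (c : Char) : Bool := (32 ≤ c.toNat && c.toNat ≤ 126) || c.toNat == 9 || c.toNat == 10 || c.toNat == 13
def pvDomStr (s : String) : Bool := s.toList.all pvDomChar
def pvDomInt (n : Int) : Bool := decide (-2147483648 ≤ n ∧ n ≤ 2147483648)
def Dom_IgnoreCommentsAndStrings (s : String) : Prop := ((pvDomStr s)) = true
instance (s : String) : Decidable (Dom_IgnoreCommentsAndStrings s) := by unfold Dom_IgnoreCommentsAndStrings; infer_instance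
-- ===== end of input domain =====

-- B replaces A's two passes (split-then-classify via an intermediate buffer) by one scan with a
-- quote counter and a comment flag, building all three strings directly: simpler decomposition.


-- ===== PORT A =====
-- First loop of A: state (flag, flag1, splitString, string3); strings as List Char,
-- '+=' is '++ [c]'.  The '"' test updates flag before the '#' test reads it, as in A.
def aPass1 : List Char → Int → Int → List Char → List Char → Int × Int × List Char × List Char
  | [], flag, flag1, split, s3 => (flag, flag1, split, s3)
  | c :: rest, flag, flag1, split, s3 =>
    let flag := if c = '"' then flag + 1 else flag
    let flag1 := if c = '#' ∧ flag % 2 = 0 then 1 else flag1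
    if flag1 = 0 then aPass1 rest flag flag1 (split ++ [c]) s3
    else aPass1 rest flag flag1 split (s3 ++ [c])

-- Second loop of A over splitString: state (flag, string1, string2).
def aPass2 : List Char → Int → List Char → List Char → Int × List Char × List Char
  | [], flag, s1, s2 => (flag, s1, s2)
  | c :: rest, flag, s1, s2 =>
    if c ≠ '"' then aPass2 rest flag (if flag % 2 = 0 then s1 ++ [c] else s1) (s2 ++ [c])
    else aPass2 rest (flag + 1) s1 (s2 ++ [c])

def IgnoreCommentsAndStrings (s : String) : List String :=
  let r1 := aPass1 s.toList 0 0 [] []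
  let r2 := aPass2 r1.2.2.1 0 [] []
  [String.ofList r2.2.1, String.ofList r2.2.2, String.ofList r1.2.2.2]

-- ===== PORT B =====
-- B's single scan: state (quotes, in_comment, string1, string2, string3).
def bScan : List Char → Int → Bool → List Char → List Char → List Char →
    List Char × List Char × List Char
  | [], _, _, s1, s2, s3 => (s1, s2, s3)
  | c :: rest, q, inc, s1, s2, s3 =>
    if inc then bScan rest q inc s1 s2 (s3 ++ [c])
    else if c = '#' ∧ q % 2 = 0 then bScan rest q true s1 s2 (s3 ++ [c])
    else if c = '"' then bScan rest (q + 1) inc s1 (s2 ++ [c]) s3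
    else bScan rest q inc (if q % 2 = 0 then s1 ++ [c] else s1) (s2 ++ [c]) s3

def IgnoreCommentsAndStrings_alt (s : String) : List String :=
  let r := bScan s.toList 0 false [] [] []
  [String.ofList r.1, String.ofList r.2.1, String.ofList r.2.2]

-- ===== PRECONDITION & SPEC =====
def Spec_IgnoreCommentsAndStrings (s : String) (out : List String) : Prop := out = IgnoreCommentsAndStrings_alt s
instance (s : String) (out : List String) : Decidable (Spec_IgnoreCommentsAndStrings s out) := by unfold Spec_IgnoreCommentsAndStrings; infer_instance

-- ===== CLAIM (what is proved, stated in full; the proofs are below) =====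
def Claim_equal_IgnoreCommentsAndStrings : Prop := ∀ (s : String), Dom_IgnoreCommentsAndStrings s → Spec_IgnoreCommentsAndStrings s (IgnoreCommentsAndStrings s)

-- ===== LEMMAS AND PROOFS =====

-- aPass2 over an appended list = run the first part, then the second from its state.
theorem aPass2_append (xs ys : List Char) (f : Int) (s1 s2 : List Char) :
    aPass2 (xs ++ ys) f s1 s2 =
      aPass2 ys (aPass2 xs f s1 s2).1 (aPass2 xs f s1 s2).2.1 (aPass2 xs f s1 s2).2.2 := by
  induction xs generalizing f s1 s2 with
  | nil => simp [aPass2]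
  | cons c rest ih =>
    simp only [List.cons_append, aPass2]
    split_ifs <;> exact ih ..

-- Once A's flag1 is 1, the first loop only appends the rest to string3.
theorem aPass1_comment (cs : List Char) (flag : Int) (split s3 : List Char) :
    aPass1 cs flag 1 split s3 = ((aPass1 cs flag 1 split s3).1, 1, split, s3 ++ cs) := by
  induction cs generalizing flag s3 with
  | nil => simp [aPass1]
  | cons c rest ih =>
    simp only [aPass1]
    rw [show (if c = '#' ∧ (if c = '"' then flag + 1 else flag) % 2 = 0 then (1 : Int) else 1)
          = 1 from by split_ifs <;> rfl,
        if_neg one_ne_zero, ih, List.append_assoc]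
    simp

-- Once B's in_comment is true, the scan only appends the rest to string3.
theorem bScan_comment (cs : List Char) (q : Int) (s1 s2 s3 : List Char) :
    bScan cs q true s1 s2 s3 = (s1, s2, s3 ++ cs) := by
  induction cs generalizing s3 with
  | nil => simp [bScan]
  | cons c rest ih => simp [bScan, ih, List.append_assoc]

-- Main invariant: if (flag, s1, s2) is the result of A's second pass on the buffer so far,
-- then B's scan from (flag, false, s1, s2, s3) computes exactly A's combined result.
theorem main_inv (cs : List Char) (flag : Int) (split s1 s2 s3 : List Char)
    (h : aPass2 split 0 [] [] = (flag, s1, s2)) :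
    bScan cs flag false s1 s2 s3 =
      ((aPass2 (aPass1 cs flag 0 split s3).2.2.1 0 [] []).2.1,
       (aPass2 (aPass1 cs flag 0 split s3).2.2.1 0 [] []).2.2,
       (aPass1 cs flag 0 split s3).2.2.2) := by
  induction cs generalizing flag split s1 s2 s3 with
  | nil => simp [aPass1, bScan, h]
  | cons c rest ih =>
    by_cases hq : c = '"'
    · -- quote: not '#', flag1 stays 0; the buffer grows and the quote count grows
      have hc1 : ¬(c = '#' ∧ (flag + 1) % 2 = 0) := by simp [hq]
      have hc2 : ¬(c = '#' ∧ flag % 2 = 0) := by simp [hq]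
      have hstep : aPass2 (split ++ [c]) 0 [] [] = (flag + 1, s1, s2 ++ [c]) := by
        rw [aPass2_append, h]; simp [aPass2, hq]
      have ha : aPass1 (c :: rest) flag 0 split s3
          = aPass1 rest (flag + 1) 0 (split ++ [c]) s3 := by
        simp only [aPass1]
        rw [if_pos hq, if_neg hc1, if_pos rfl]
      have hb : bScan (c :: rest) flag false s1 s2 s3
          = bScan rest (flag + 1) false s1 (s2 ++ [c]) s3 := by
        simp only [bScan]
        rw [if_neg Bool.false_ne_true, if_neg hc2, if_pos hq]
      rw [hb, ih _ _ _ _ _ hstep, ha]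
    · by_cases hc : c = '#' ∧ flag % 2 = 0
      · -- the comment starts here: both sides append the rest to string3
        have ha : aPass1 (c :: rest) flag 0 split s3
            = aPass1 rest flag 1 split (s3 ++ [c]) := by
          simp only [aPass1]
          rw [if_neg hq, if_pos hc, if_neg one_ne_zero]
        have hb : bScan (c :: rest) flag false s1 s2 s3
            = bScan rest flag true s1 s2 (s3 ++ [c]) := by
          simp only [bScan]
          rw [if_neg Bool.false_ne_true, if_pos hc]
        rw [hb, bScan_comment, ha, aPass1_comment]
        simp [h, List.append_assoc]
      · -- ordinary character in code
        have hstep : aPass2 (split ++ [c]) 0 [] []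
            = (flag, if flag % 2 = 0 then s1 ++ [c] else s1, s2 ++ [c]) := by
          rw [aPass2_append, h]; simp [aPass2, hq]
        have ha : aPass1 (c :: rest) flag 0 split s3
            = aPass1 rest flag 0 (split ++ [c]) s3 := by
          simp only [aPass1]
          rw [if_neg hq, if_neg hc, if_pos rfl]
        have hb : bScan (c :: rest) flag false s1 s2 s3
            = bScan rest flag false (if flag % 2 = 0 then s1 ++ [c] else s1) (s2 ++ [c]) s3 := by
          simp only [bScan]
          rw [if_neg Bool.false_ne_true, if_neg hc, if_neg hq]
        rw [hb, ih _ _ _ _ _ hstep, ha]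

-- ===== VERDICT (by name: the statement is the Claim_ definition above) =====
theorem IgnoreCommentsAndStrings_spec : Claim_equal_IgnoreCommentsAndStrings := by
  intro s _
  unfold Spec_IgnoreCommentsAndStrings IgnoreCommentsAndStrings IgnoreCommentsAndStrings_alt
  rw [main_inv s.toList 0 [] [] [] [] (by simp [aPass2])]
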